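-- pv_equiv track=rewrite | github.com/emoeller80281/Custom_GRN_Inference | src/testing_scripts/test_relational_database_methods.py | build_full_edges
-- ===== SOURCE A (Python) =====
-- def build_full_edges(tf_peak_edges, peak_tg_edges):
--     full_edges = set()
--     # Create a lookup from peak_id to list of target_ids
--     peak_to_targets = {}
--     for peak_id, target_id in peak_tg_edges:
--         peak_to_targets.setdefault(peak_id, set()).add(target_id)
--
--     # Now join: for each (source_id, peak_id), attach matching target_ids
--     for source_id, peak_id in tf_peak_edges:
--         if peak_id in peak_to_targets:
--             for target_id in peak_to_targets[peak_id]: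
--                 full_edges.add((source_id, peak_id, target_id))
--
--     return full_edges
-- ===== SOURCE B (Python) =====
-- def build_full_edges(tf_peak_edges, peak_tg_edges):
--     # Naive nested-loop join: no peak->targets index, just rescan peak_tg_edges
--     # for every TF-peak edge and collect matching triples in a set.
--     full_edges = set()
--     for source_id, peak_id in tf_peak_edges:
--         for p, target_id in peak_tg_edges:
--             if peak_id == p:
--                 full_edges.add((source_id, peak_id, target_id))
--     return full_edges
-- ===== Notes on version B (the rewrite author's own statement) =====
-- stated objective: simpler
-- what changed: Replaced the peak->set-of-targets dictionary index plus membership test with a direct nested-loop join that rescans peak_tg_edges for each TF-peak edge and adds matching triples to the result set.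
import Mathlib
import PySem

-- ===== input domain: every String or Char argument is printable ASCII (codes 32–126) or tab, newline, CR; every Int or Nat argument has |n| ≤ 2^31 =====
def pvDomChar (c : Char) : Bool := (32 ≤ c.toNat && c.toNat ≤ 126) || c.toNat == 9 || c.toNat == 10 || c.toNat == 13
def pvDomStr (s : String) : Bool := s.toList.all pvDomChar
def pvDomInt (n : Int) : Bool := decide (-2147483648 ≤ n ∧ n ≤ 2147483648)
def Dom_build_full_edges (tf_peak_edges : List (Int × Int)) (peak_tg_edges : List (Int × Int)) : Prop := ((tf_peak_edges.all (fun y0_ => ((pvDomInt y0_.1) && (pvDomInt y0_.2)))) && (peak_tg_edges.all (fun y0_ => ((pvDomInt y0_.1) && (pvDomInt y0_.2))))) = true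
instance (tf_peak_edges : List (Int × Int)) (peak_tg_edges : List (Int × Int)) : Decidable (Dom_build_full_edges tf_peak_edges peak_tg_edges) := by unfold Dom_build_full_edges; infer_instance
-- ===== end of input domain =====

-- B replaces A's peak->targets index with a naive nested-loop join (simpler decomposition, same result set).


-- ===== PORT A =====
def build_full_edges (tf_peak_edges : List (Int × Int)) (peak_tg_edges : List (Int × Int)) : List (Int × Int × Int) :=
  -- peak_to_targets = {}; for peak_id, target_id in peak_tg_edges: setdefault(peak_id, set()).add(target_id)
  let peak_to_targets : PySem.Dict Int (PySem.Set Int) :=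
    peak_tg_edges.foldl
      (fun d e => d.insert e.1 (PySem.Set.add (d.getD e.1 PySem.Set.empty) e.2))
      PySem.Dict.empty
  -- for source_id, peak_id in tf_peak_edges: if peak_id in peak_to_targets: add all triples
  tf_peak_edges.foldl
    (fun acc e =>
      if peak_to_targets.contains e.2 then
        (peak_to_targets.getD e.2 PySem.Set.empty).foldl
          (fun acc2 t => PySem.Set.add acc2 (e.1, e.2, t)) acc
      else acc)
    PySem.Set.empty

-- ===== PORT B =====
def build_full_edges_alt (tf_peak_edges : List (Int × Int)) (peak_tg_edges : List (Int × Int)) : List (Int × Int × Int) :=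
  tf_peak_edges.foldl
    (fun acc e =>
      peak_tg_edges.foldl
        (fun acc2 f => if e.2 == f.1 then PySem.Set.add acc2 (e.1, e.2, f.2) else acc2)
        acc)
    PySem.Set.empty

-- ===== PRECONDITION & SPEC =====
def Spec_build_full_edges (tf_peak_edges : List (Int × Int)) (peak_tg_edges : List (Int × Int)) (out : List (Int × Int × Int)) : Prop := out = build_full_edges_alt tf_peak_edges peak_tg_edges
instance (tf_peak_edges : List (Int × Int)) (peak_tg_edges : List (Int × Int)) (out : List (Int × Int × Int)) : Decidable (Spec_build_full_edges tf_peak_edges peak_tg_edges out) := by unfold Spec_build_full_edges; infer_instance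

-- ===== CLAIM (what is proved, stated in full; the proofs are below) =====
def Claim_equal_build_full_edges : Prop := ∀ (tf_peak_edges : List (Int × Int)) (peak_tg_edges : List (Int × Int)), Dom_build_full_edges tf_peak_edges peak_tg_edges → Spec_build_full_edges tf_peak_edges peak_tg_edges (build_full_edges tf_peak_edges peak_tg_edges)

-- ===== LEMMAS AND PROOFS =====

-- helper names for the proofs
def dictStep (d : PySem.Dict Int (PySem.Set Int)) (e : Int × Int) : PySem.Dict Int (PySem.Set Int) :=
  d.insert e.1 (PySem.Set.add (d.getD e.1 PySem.Set.empty) e.2)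

def addT (s k : Int) (a : PySem.Set (Int × Int × Int)) (t : Int) : PySem.Set (Int × Int × Int) :=
  PySem.Set.add a (s, k, t)

lemma getD_dict_foldl (pt : List (Int × Int)) : ∀ (d : PySem.Dict Int (PySem.Set Int)) (k : Int),
    (pt.foldl dictStep d).getD k PySem.Set.empty
      = ((pt.filter (fun e => e.1 == k)).map (·.2)).foldl PySem.Set.add (d.getD k PySem.Set.empty) := by
  induction pt with
  | nil => intro d k; rfl
  | cons e pt ih =>
    intro d k
    rw [List.foldl_cons, ih]
    by_cases h : e.1 = k
    · subst h
      simp [dictStep]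
    · simp [dictStep, PySem.Dict.getD_insert, h, Ne.symm h]

lemma contains_dict_foldl (pt : List (Int × Int)) : ∀ (d : PySem.Dict Int (PySem.Set Int)) (k : Int),
    (pt.foldl dictStep d).contains k = (d.contains k || pt.any (fun e => e.1 == k)) := by
  induction pt with
  | nil => intro d k; simp
  | cons e pt ih =>
    intro d k
    rw [List.foldl_cons, ih]
    by_cases h : e.1 = k
    · simp [dictStep, h]
    · have h1 : (k == e.1) = false := by simp [Ne.symm h]
      have h2 : (e.1 == k) = false := by simp [h]
      simp [dictStep, PySem.Dict.contains_insert, h1, h2]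

lemma mem_foldl_addT (s k t : Int) : ∀ (u : List Int) (acc : PySem.Set (Int × Int × Int)),
    t ∈ u ∨ (s, k, t) ∈ acc → (s, k, t) ∈ u.foldl (addT s k) acc := by
  intro u
  induction u with
  | nil => intro acc h; simpa using h
  | cons x u ih =>
    intro acc h
    refine ih _ ?_
    rcases h with h | h
    · rcases List.mem_cons.mp h with h | h
      · exact Or.inr (show (s, k, t) ∈ addT s k acc x from
          (PySem.Set.mem_add acc (s, k, x) (s, k, t)).mpr (Or.inr (by simp [h])))
      · exact Or.inl h
    · exact Or.inr (show (s, k, t) ∈ addT s k acc x from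
        (PySem.Set.mem_add acc (s, k, x) (s, k, t)).mpr (Or.inl h))

lemma foldl_add_then_addT (s k : Int) (ts : List Int) :
    ∀ (u : List Int) (acc : PySem.Set (Int × Int × Int)),
    (ts.foldl PySem.Set.add u).foldl (addT s k) acc = ts.foldl (addT s k) (u.foldl (addT s k) acc) := by
  induction ts with
  | nil => intro u acc; rfl
  | cons t ts ih =>
    intro u acc
    rw [List.foldl_cons, List.foldl_cons, ih]
    congr 1
    by_cases h : t ∈ u
    · have hadd : PySem.Set.add u t = u := by
        simp [PySem.Set.add, PySem.Set.contains, h]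
      rw [hadd, addT]
      have hmem : (s, k, t) ∈ u.foldl (addT s k) acc := mem_foldl_addT s k t u acc (Or.inl h)
      simp [PySem.Set.add, PySem.Set.contains, hmem]
    · have hadd : PySem.Set.add u t = u ++ [t] := by
        simp [PySem.Set.add, PySem.Set.contains, h]
      rw [hadd, List.foldl_append]
      rfl

lemma foldl_join_filter (s k : Int) (pt : List (Int × Int)) :
    ∀ (acc : PySem.Set (Int × Int × Int)),
    pt.foldl (fun a f => if k == f.1 then PySem.Set.add a (s, k, f.2) else a) acc
      = ((pt.filter (fun e => e.1 == k)).map (·.2)).foldl (addT s k) acc := by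
  induction pt with
  | nil => intro acc; rfl
  | cons f pt ih =>
    intro acc
    by_cases h : f.1 = k
    · have hb : (k == f.1) = true := by simp [h]
      simp only [List.foldl_cons, hb, if_true]
      rw [ih]
      simp [h, addT]
    · have hb : (k == f.1) = false := by simp [Ne.symm h]
      simp only [List.foldl_cons, hb, Bool.false_eq_true, if_false]
      rw [ih]
      simp [h]

lemma inner_eq (s k : Int) (pt : List (Int × Int)) (acc : PySem.Set (Int × Int × Int)) :
    (if (pt.foldl dictStep PySem.Dict.empty).contains k then
        ((pt.foldl dictStep PySem.Dict.empty).getD k PySem.Set.empty).foldl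
          (fun a t => PySem.Set.add a (s, k, t)) acc
      else acc)
      = pt.foldl (fun a f => if k == f.1 then PySem.Set.add a (s, k, f.2) else a) acc := by
  rw [contains_dict_foldl, getD_dict_foldl, foldl_join_filter]
  have hcontains : (PySem.Dict.empty : PySem.Dict Int (PySem.Set Int)).contains k = false := rfl
  have hempty : (PySem.Dict.empty : PySem.Dict Int (PySem.Set Int)).getD k PySem.Set.empty
      = PySem.Set.empty := rfl
  rw [hcontains, hempty]
  cases hany : pt.any (fun e => e.1 == k) with
  | true =>
    simp only [Bool.false_or, if_true]
    have := foldl_add_then_addT s k ((pt.filter (fun e => e.1 == k)).map (·.2)) PySem.Set.empty acc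
    simpa [addT] using this
  | false =>
    have hfilter : pt.filter (fun e => e.1 == k) = [] := by
      rw [List.filter_eq_nil_iff]
      exact List.any_eq_false.mp hany
    simp [hfilter]

lemma outer_eq (tf pt : List (Int × Int)) :
    ∀ (acc : PySem.Set (Int × Int × Int)),
    tf.foldl
      (fun acc e =>
        if (pt.foldl dictStep PySem.Dict.empty).contains e.2 then
          ((pt.foldl dictStep PySem.Dict.empty).getD e.2 PySem.Set.empty).foldl
            (fun acc2 t => PySem.Set.add acc2 (e.1, e.2, t)) acc
        else acc) acc
      = tf.foldl
          (fun acc e =>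
            pt.foldl (fun acc2 f => if e.2 == f.1 then PySem.Set.add acc2 (e.1, e.2, f.2) else acc2) acc)
          acc := by
  induction tf with
  | nil => intro acc; rfl
  | cons e tf ih =>
    intro acc
    rw [List.foldl_cons, List.foldl_cons, inner_eq, ih]

-- ===== VERDICT (by name: the statement is the Claim_ definition above) =====
theorem build_full_edges_spec : Claim_equal_build_full_edges := by
  intro tf pt _
  unfold Spec_build_full_edges build_full_edges build_full_edges_alt
  exact outer_eq tf pt PySem.Set.empty
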